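-- pv_equiv track=rewrite | github.com/kiemlicz/ambassador | salt/base/_modules/dns_ext.py | aliases
-- ===== SOURCE A (Python) =====
-- def aliases(fqdn, separator='.'):
--     if fqdn is None:
--         return []
--     l = fqdn.split(separator)
--     result = [l[0]]
--     for i in range(1, len(l)):
--         result.append("{}.{}".format(result[i-1], l[i]))
--     return result
-- ===== SOURCE B (Python) =====
-- def aliases(fqdn, separator='.'):
--     if fqdn is None:
--         return []
--     l = fqdn.split(separator)
--     return [".".join(l[:i + 1]) for i in range(len(l))]
-- ===== Notes on version B (the rewrite author's own statement) =====
-- stated objective: simpler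
-- what changed: Drops the running accumulator (each alias built by extending the previously appended result string) and instead computes each alias independently as '.'.join of a prefix slice of the split list.
import Mathlib
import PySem

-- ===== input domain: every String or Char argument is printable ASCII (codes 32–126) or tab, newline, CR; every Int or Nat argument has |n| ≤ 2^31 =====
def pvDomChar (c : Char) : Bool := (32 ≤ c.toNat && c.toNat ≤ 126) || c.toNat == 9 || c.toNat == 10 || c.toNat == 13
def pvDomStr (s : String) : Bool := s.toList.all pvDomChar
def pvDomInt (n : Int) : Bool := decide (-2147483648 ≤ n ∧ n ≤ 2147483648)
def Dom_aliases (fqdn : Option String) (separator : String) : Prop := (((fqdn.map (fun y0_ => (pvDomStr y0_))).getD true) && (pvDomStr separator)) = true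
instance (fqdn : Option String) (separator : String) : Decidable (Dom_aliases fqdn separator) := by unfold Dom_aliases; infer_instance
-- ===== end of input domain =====

-- ===== PORT A =====
-- B replaces A's running-accumulator loop by independent per-prefix joins (objective: simpler).
-- Step of A's loop: result.append("{}.{}".format(result[i-1], l[i])).
def aliasStep (l : List String) (result : List String) (i : Int) : List String :=
  result ++ [PySem.Str.join "." [(PySem.List.pyGet? result (i - 1)).getD "", (PySem.List.pyGet? l i).getD ""]]

def aliases (fqdn : Option String) (separator : String) : List String :=
  match fqdn with
  | none => []
  | some s =>
    match PySem.Str.split? s separator with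
    | none => []  -- separator = "": Python raises ValueError; excluded by Pre_aliases
    | some l =>
      (PySem.List.pyRange 1 l.length 1).foldl (aliasStep l) [(PySem.List.pyGet? l 0).getD ""]

-- ===== PORT B =====
def aliases_alt (fqdn : Option String) (separator : String) : List String :=
  match fqdn with
  | none => []
  | some s =>
    match PySem.Str.split? s separator with
    | none => []  -- separator = "": Python raises ValueError; excluded by Pre_aliases
    | some l => (List.range l.length).map (fun i => PySem.Str.join "." (l.take (i + 1)))

-- ===== PRECONDITION & SPEC =====
-- Pre_ excludes only separator = "" with a non-None fqdn, where both A and B raise ValueError.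
def Pre_aliases (fqdn : Option String) (separator : String) : Prop :=
  fqdn = none ∨ separator ≠ ""
instance (fqdn : Option String) (separator : String) : Decidable (Pre_aliases fqdn separator) := by
  unfold Pre_aliases; infer_instance
def pvWitness_aliases : Option String × String := (some "a.b.c", ".")

def Spec_aliases (fqdn : Option String) (separator : String) (out : List String) : Prop := out = aliases_alt fqdn separator
instance (fqdn : Option String) (separator : String) (out : List String) : Decidable (Spec_aliases fqdn separator out) := by unfold Spec_aliases; infer_instance

-- ===== CLAIM (what is proved, stated in full; the proofs are below) =====
def Claim_equal_aliases : Prop := ∀ (fqdn : Option String) (separator : String), Dom_aliases fqdn separator → Pre_aliases fqdn separator → Spec_aliases fqdn separator (aliases fqdn separator)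

-- ===== LEMMAS AND PROOFS =====

-- Python's str.split never returns an empty list of pieces.
theorem splitOn_go_ne_nil : ∀ (fuel : ℕ) (sep l cur : List Char) (acc : List (List Char)),
    PySem.Chars.splitOn.go sep fuel l cur acc ≠ [] := by
  intro fuel
  induction fuel with
  | zero => intro sep l cur acc; simp [PySem.Chars.splitOn.go]
  | succ f ih =>
    intro sep l cur acc
    cases l with
    | nil => simp [PySem.Chars.splitOn.go]
    | cons c rest =>
      rw [PySem.Chars.splitOn.go]
      split <;> apply ih

theorem split?_ne_nil (s sep : String) (l : List String) (h : PySem.Str.split? s sep = some l) :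
    l ≠ [] := by
  intro hnil
  subst hnil
  have h2 := PySem.Str.split?_map s sep
  rw [h] at h2
  simp only [Option.map_some, List.map_nil] at h2
  unfold PySem.Chars.split? at h2
  split at h2
  · simp at h2
  · unfold PySem.Chars.splitOn at h2
    injection h2 with h2'
    exact splitOn_go_ne_nil _ _ _ _ _ h2'.symm

theorem join_singleton_str (x : String) : PySem.Str.join "." [x] = x := by
  simp [PySem.Str.join, PySem.Chars.join, List.intercalate]

theorem chars_join_append (sep y : List Char) :
    ∀ (xs : List (List Char)), xs ≠ [] →
    PySem.Chars.join sep (xs ++ [y]) = PySem.Chars.join sep xs ++ sep ++ y := by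
  intro xs
  induction xs with
  | nil => intro h; exact absurd rfl h
  | cons a t ih =>
    intro _
    cases t with
    | nil => simp [PySem.Chars.join_cons_cons, PySem.Chars.join_singleton]
    | cons b r =>
      have h1 : (a :: b :: r) ++ [y] = a :: b :: (r ++ [y]) := by simp
      rw [h1, PySem.Chars.join_cons_cons]
      have h2 : b :: (r ++ [y]) = (b :: r) ++ [y] := by simp
      rw [h2, ih (by simp), PySem.Chars.join_cons_cons]
      simp [List.append_assoc]

theorem str_join_append (y : String) (xs : List String) (hxs : xs ≠ []) :
    PySem.Str.join "." (xs ++ [y]) = PySem.Str.join "." [PySem.Str.join "." xs, y] := by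
  apply String.toList_inj.mp
  rw [PySem.Str.toList_join, PySem.Str.toList_join]
  simp only [List.map_append, List.map_cons, List.map_nil]
  rw [chars_join_append _ _ (List.map String.toList xs) (by simpa using hxs)]
  rw [PySem.Chars.join_cons_cons, PySem.Chars.join_singleton, PySem.Str.toList_join]

-- each alias is the '.'-join of a prefix of the pieces
theorem loop_inv (l : List String) (m : ℕ) :
    ∀ (k : ℕ), 1 ≤ k → k + m = l.length →
    (PySem.List.pyRange (k : Int) (l.length : Int) 1).foldl (aliasStep l)
        ((List.range k).map (fun i => PySem.Str.join "." (l.take (i + 1)))) =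
      (List.range l.length).map (fun i => PySem.Str.join "." (l.take (i + 1))) := by
  induction m with
  | zero =>
    intro k hk hkm
    simp only [Nat.add_zero] at hkm
    subst hkm
    simp [PySem.List.pyRange]
  | succ m ih =>
    intro k hk hkm
    have hklt : k < l.length := by omega
    rw [PySem.List.pyRange_one_cons (by exact_mod_cast hklt)]
    rw [List.foldl_cons]
    have hstep : aliasStep l ((List.range k).map (fun i => PySem.Str.join "." (l.take (i + 1)))) (k : Int) =
        (List.range (k + 1)).map (fun i => PySem.Str.join "." (l.take (i + 1))) := by
      unfold aliasStep
      have h1 : ((k : Int) - 1) = ((k - 1 : ℕ) : Int) := by rw [Nat.cast_sub hk, Nat.cast_one]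
      rw [h1, PySem.List.pyGet?_natCast, PySem.List.pyGet?_natCast]
      have hk1 : k - 1 < k := by omega
      rw [List.getElem?_map, List.getElem?_range hk1, List.getElem?_eq_getElem hklt]
      simp only [Option.map_some, Option.getD_some]
      have hsub : k - 1 + 1 = k := by omega
      rw [hsub, List.range_succ, List.map_append, List.map_singleton]
      congr 1
      have htake : l.take (k + 1) = l.take k ++ [l[k]] := by
        rw [List.take_add_one, List.getElem?_eq_getElem hklt]
        rfl
      rw [htake, str_join_append _ _ (by
        rw [Ne, List.take_eq_nil_iff]
        rintro (rfl | rfl)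
        · exact absurd hk (by omega)
        · exact absurd hklt (Nat.not_lt_zero k))]
    rw [hstep]
    have : (k : Int) + 1 = ((k + 1 : ℕ) : Int) := by omega
    rw [this]
    exact ih (k + 1) (by omega) (by omega)

-- ===== VERDICT (by name: the statement is the Claim_ definition above) =====
theorem aliases_spec : Claim_equal_aliases := by
  intro fqdn separator _ hpre
  unfold Spec_aliases aliases aliases_alt
  cases fqdn with
  | none => rfl
  | some s =>
    cases hsplit : PySem.Str.split? s separator with
    | none => simp [hsplit]
    | some l =>
      simp only [hsplit]
      have hne := split?_ne_nil s separator l hsplit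
      cases l with
      | nil => exact absurd rfl hne
      | cons x t =>
        have hinit : [(PySem.List.pyGet? (x :: t) 0).getD ""] =
            (List.range 1).map (fun i => PySem.Str.join "." ((x :: t).take (i + 1))) := by
          simp [PySem.List.pyGet?, PySem.List.pyIdx?, join_singleton_str]
        rw [hinit]
        have h1 : (1 : Int) = ((1 : ℕ) : Int) := rfl
        rw [h1]
        exact loop_inv (x :: t) ((x :: t).length - 1) 1 le_rfl (by simp [Nat.add_comm])
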